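-- pv_equiv track=rewrite | github.com/Michal0ss/WDI | WDI_algo/Zestaw_3/z115.py | same_factor
-- ===== SOURCE A (Python) =====
-- def same_factor(a,b):
--     def factors(n):
--         factor=[]
--         d =2
--         while d*d <=n:
--             while n % d == 0:
--                 if d not in factor:
--                     factor.append(d)
--                 n//=d
--             d+=1
--         if n > 1:
--             factor.append(n)
--         return factor
--
--     factors_a=factors(a)
--     factors_b=factors(b)
--
--     same_fac = [x for x in factors_a if x in factors_b]
--
--     return len(same_fac)==1
-- ===== SOURCE B (Python) =====
-- def same_factor(a, b):
--     # Count, in one trial-division pass over a only, the distinct prime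
--     # factors of a that also divide b; never factor b at all.
--     if b < 2:
--         return False
--     count = 0
--     n = a
--     d = 2
--     while d * d <= n:
--         if n % d == 0:
--             if b % d == 0:
--                 count += 1
--             while n % d == 0:
--                 n //= d
--         d += 1
--     if n > 1 and b % n == 0:
--         count += 1
--     return count == 1
-- ===== Notes on version B (the rewrite author's own statement) =====
-- stated objective: alternative
-- what changed: B never factors b: one trial-division pass over a counts its distinct prime factors that also divide b (tested by a direct modulus), instead of building both prime-factor lists and intersecting them.
import Mathlib
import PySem

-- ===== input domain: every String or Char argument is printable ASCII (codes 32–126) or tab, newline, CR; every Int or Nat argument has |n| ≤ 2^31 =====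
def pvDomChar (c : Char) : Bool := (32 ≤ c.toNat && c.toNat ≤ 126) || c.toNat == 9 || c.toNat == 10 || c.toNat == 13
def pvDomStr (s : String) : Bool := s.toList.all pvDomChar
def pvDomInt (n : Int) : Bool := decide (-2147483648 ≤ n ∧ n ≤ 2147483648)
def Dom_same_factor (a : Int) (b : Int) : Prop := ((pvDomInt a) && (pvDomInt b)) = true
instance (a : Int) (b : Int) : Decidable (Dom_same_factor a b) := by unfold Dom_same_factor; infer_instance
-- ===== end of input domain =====

-- B re-implements A by a single trial-division pass over a, testing each found prime
-- against b by a direct modulus (b is never factored); equal return value on all inputs.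

-- ===== PORT A =====
-- inner `while n % d == 0` loop of factors(); fuel n.toNat+1 always suffices at call sites
def aInner (fuel : Nat) (n : Int) (d : Int) (factor : List Int) : Int × List Int :=
  match fuel with
  | 0 => (n, factor)
  | fuel + 1 =>
    if PySem.Int.mod n d == 0 then
      let factor' := if factor.contains d then factor else factor ++ [d]
      aInner fuel (PySem.Int.floordiv n d) d factor'
    else (n, factor)

-- outer `while d*d <= n` loop of factors(), including the trailing `if n > 1` append
def aOuter (fuel : Nat) (n : Int) (d : Int) (factor : List Int) : List Int :=
  match fuel with
  | 0 => if 1 < n then factor ++ [n] else factor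
  | fuel + 1 =>
    if d * d ≤ n then
      let r := aInner (n.toNat + 1) n d factor
      aOuter fuel r.1 (d + 1) r.2
    else if 1 < n then factor ++ [n] else factor

def aFactors (n : Int) : List Int := aOuter (n.toNat + 2) n 2 []

def same_factor (a : Int) (b : Int) : Bool :=
  let factors_a := aFactors a
  let factors_b := aFactors b
  let same_fac := factors_a.filter (fun x => factors_b.contains x)
  same_fac.length == 1

-- ===== PORT B =====
-- inner `while n % d == 0: n //= d` loop of B
def bStrip (fuel : Nat) (n : Int) (d : Int) : Int :=
  match fuel with
  | 0 => n
  | fuel + 1 =>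
    if PySem.Int.mod n d == 0 then bStrip fuel (PySem.Int.floordiv n d) d else n

-- outer `while d*d <= n` loop of B: returns (count, n) at loop exit
def bOuter (b : Int) (fuel : Nat) (n : Int) (d : Int) (count : Int) : Int × Int :=
  match fuel with
  | 0 => (count, n)
  | fuel + 1 =>
    if d * d ≤ n then
      if PySem.Int.mod n d == 0 then
        let count' := if PySem.Int.mod b d == 0 then count + 1 else count
        bOuter b fuel (bStrip (n.toNat + 1) n d) (d + 1) count'
      else bOuter b fuel n (d + 1) count
    else (count, n)

def same_factor_alt (a : Int) (b : Int) : Bool :=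
  if b < 2 then false
  else
    let r := bOuter b (a.toNat + 2) a 2 0
    let count := if 1 < r.2 ∧ PySem.Int.mod b r.2 == 0 then r.1 + 1 else r.1
    count == 1

-- ===== PRECONDITION & SPEC =====
def Spec_same_factor (a : Int) (b : Int) (out : Bool) : Prop := out = same_factor_alt a b
instance (a : Int) (b : Int) (out : Bool) : Decidable (Spec_same_factor a b out) := by unfold Spec_same_factor; infer_instance

-- ===== CLAIM (what is proved, stated in full; the proofs are below) =====
def Claim_equal_same_factor : Prop := ∀ (a : Int) (b : Int), Dom_same_factor a b → Spec_same_factor a b (same_factor a b)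

-- ===== LEMMAS AND PROOFS =====

-- `n % d == 0` as divisibility
theorem pv_mod0 (n d : Int) : (PySem.Int.mod n d == 0) = true ↔ d ∣ n := by
  simp [PySem.Int.mod_eq_zero_iff_dvd]

-- an integer ≥ 2 with no divisor in [2, p) is prime
theorem pv_prime_of_minimal (p : Int) (h2 : 2 ≤ p)
    (h : ∀ e : Int, 2 ≤ e → e < p → ¬ e ∣ p) : Prime p := by
  rw [Int.prime_iff_natAbs_prime, Nat.prime_def_lt]
  constructor
  · omega
  · intro m hm hdvd
    by_contra h1
    have hm0 : m ≠ 0 := by rintro rfl; simp at hdvd; omega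
    have : (m : Int) ∣ p := by
      have := Int.natCast_dvd_natCast.mpr hdvd
      rwa [Int.natAbs_of_nonneg (by omega)] at this
    exact h m (by omega) (by omega) this

theorem pv_prime_dvd_prime (p q : Int) (h2 : 2 ≤ p) (hq2 : 2 ≤ q)
    (hq : Prime q) (hd : p ∣ q) : p = q := by
  have h1 := Int.le_of_dvd (by omega) hd
  have := Nat.Prime.eq_one_or_self_of_dvd (Int.prime_iff_natAbs_prime.mp hq)
    p.natAbs (Int.natAbs_dvd_natAbs.mpr hd)
  omega

-- bStrip: divides n, stays positive, removes every factor d, keeps other prime factors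
theorem bStrip_spec (fuel : Nat) : ∀ n d : Int, 1 ≤ n → 2 ≤ d → n.toNat ≤ fuel →
    (bStrip fuel n d ∣ n) ∧ 1 ≤ bStrip fuel n d ∧ ¬ d ∣ bStrip fuel n d ∧
    (∀ p : Int, Prime p → ¬ p ∣ d → p ∣ n → p ∣ bStrip fuel n d) := by
  induction fuel with
  | zero => intro n d h1 hd hf; omega
  | succ fuel ih =>
    intro n d h1 hd hf
    by_cases hdv : d ∣ n
    · obtain ⟨k, rfl⟩ := hdv
      have hk1 : 1 ≤ k := by nlinarith
      have hmod : (PySem.Int.mod (d * k) d == 0) = true := (pv_mod0 _ _).mpr ⟨k, rfl⟩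
      have hfd : PySem.Int.floordiv (d * k) d = k := by
        rw [PySem.Int.floordiv_eq_ediv_of_pos (by omega)]
        exact Int.mul_ediv_cancel_left k (by omega)
      have hklt : k < d * k := by nlinarith
      have hkf : k.toNat ≤ fuel := by
        have h0 : (0:Int) < d * k := by nlinarith
        have := (Int.toNat_lt_toNat h0).mpr hklt
        omega
      have hrw : bStrip (fuel + 1) (d * k) d = bStrip fuel k d := by
        simp [bStrip, hmod, hfd]
      obtain ⟨hdvd, hpos, hnd, hp⟩ := ih k d hk1 hd hkf
      rw [hrw]
      refine ⟨hdvd.trans ⟨d, by ring⟩, hpos, hnd, ?_⟩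
      intro p hp1 hp2 hp3
      apply hp p hp1 hp2
      rcases hp1.2.2 d k hp3 with h | h
      · exact absurd h hp2
      · exact h
    · have hmod : (PySem.Int.mod n d == 0) = false := by
        rw [Bool.eq_false_iff]
        intro hc; exact hdv ((pv_mod0 _ _).mp hc)
      have hrw : bStrip (fuel + 1) n d = n := by simp [bStrip, hmod]
      rw [hrw]
      exact ⟨dvd_refl n, h1, hdv, fun p _ _ h => h⟩

theorem bStrip_id (fuel : Nat) (n d : Int) (h : (PySem.Int.mod n d == 0) = false) :
    bStrip fuel n d = n := by
  cases fuel <;> simp [bStrip, h]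

-- aInner with d already collected only strips
theorem aInner_contains (fuel : Nat) : ∀ (n d : Int) (factor : List Int),
    factor.contains d = true → aInner fuel n d factor = (bStrip fuel n d, factor) := by
  induction fuel with
  | zero => intro n d f _; rfl
  | succ fuel ih =>
    intro n d f h
    by_cases hm : (PySem.Int.mod n d == 0) = true
    · simp only [aInner, bStrip, hm, if_true, h]
      exact ih _ _ _ h
    · simp [aInner, bStrip, hm]

-- aInner with d not yet collected: strips and appends d exactly when d ∣ n
theorem aInner_fresh (fuel : Nat) (n d : Int) (factor : List Int)
    (h : factor.contains d = false) :
    aInner (fuel + 1) n d factor =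
      (bStrip (fuel + 1) n d,
       if PySem.Int.mod n d == 0 then factor ++ [d] else factor) := by
  by_cases hm : (PySem.Int.mod n d == 0) = true
  · have hc : (factor ++ [d]).contains d = true := by
      simp [List.contains_iff_mem]
    simp only [aInner, bStrip, hm, if_true, h, Bool.false_eq_true, if_false]
    exact aInner_contains fuel _ d _ hc
  · simp [aInner, bStrip, hm]

theorem aOuter_succ_pos (fuel : Nat) (n d : Int) (factor : List Int) (hdd : d * d ≤ n) :
    aOuter (fuel + 1) n d factor =
      aOuter fuel (aInner (n.toNat + 1) n d factor).1 (d + 1)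
        (aInner (n.toNat + 1) n d factor).2 := by
  simp [aOuter, hdd]

theorem aOuter_exit (fuel : Nat) (n d : Int) (factor : List Int) (hdd : ¬ d * d ≤ n) :
    aOuter fuel n d factor = if 1 < n then factor ++ [n] else factor := by
  cases fuel <;> simp [aOuter, hdd]

-- the already-collected prefix just rides along
theorem aOuter_prefix (fuel : Nat) : ∀ (n d : Int) (factor : List Int),
    (∀ x ∈ factor, x < d) → aOuter fuel n d factor = factor ++ aOuter fuel n d [] := by
  induction fuel with
  | zero => intro n d f _; by_cases h1 : 1 < n <;> simp [aOuter, h1]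
  | succ fuel ih =>
    intro n d f h
    have hcf : f.contains d = false := by
      rw [Bool.eq_false_iff]
      intro hc
      exact absurd (h d (List.contains_iff_mem.mp hc)) (lt_irrefl d)
    by_cases hdd : d * d ≤ n
    · rw [aOuter_succ_pos _ _ _ _ hdd, aOuter_succ_pos _ _ _ [] hdd]
      rw [aInner_fresh _ _ _ _ hcf, aInner_fresh _ _ _ [] rfl]
      by_cases hm : (PySem.Int.mod n d == 0) = true
      · simp only [hm, if_true, List.nil_append]
        rw [ih _ _ (f ++ [d]) (by intro x hx; rcases List.mem_append.mp hx with hx | hx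
                                  · exact lt_trans (h x hx) (by omega)
                                  · simp at hx; omega),
            ih _ _ [d] (by intro x hx; simp at hx; omega)]
        simp [List.append_assoc]
      · simp only [hm, Bool.false_eq_true, if_false]
        exact ih _ _ f (fun x hx => lt_trans (h x hx) (by omega))
    · rw [aOuter_exit _ _ _ _ hdd, aOuter_exit _ _ _ [] hdd]
      by_cases h1 : 1 < n <;> simp [h1]

-- the abstract run: primes emitted by the loop, and the final n at loop exit
def pvEmitted (fuel : Nat) (n d : Int) : List Int × Int :=
  match fuel with
  | 0 => ([], n)
  | fuel + 1 =>
    if d * d ≤ n then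
      let r := pvEmitted fuel (bStrip (n.toNat + 1) n d) (d + 1)
      ((if PySem.Int.mod n d == 0 then [d] else []) ++ r.1, r.2)
    else ([], n)

theorem aOuter_emitted (fuel : Nat) : ∀ n d : Int,
    aOuter fuel n d [] = (pvEmitted fuel n d).1 ++
      (if 1 < (pvEmitted fuel n d).2 then [(pvEmitted fuel n d).2] else []) := by
  induction fuel with
  | zero => intro n d; by_cases h1 : 1 < n <;> simp [aOuter, pvEmitted, h1]
  | succ fuel ih =>
    intro n d
    by_cases hdd : d * d ≤ n
    · rw [aOuter_succ_pos _ _ _ _ hdd, aInner_fresh _ _ _ [] rfl]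
      simp only [pvEmitted, hdd, if_true]
      by_cases hm : (PySem.Int.mod n d == 0) = true
      · simp only [hm, if_true, List.nil_append]
        rw [aOuter_prefix fuel _ _ [d] (by intro x hx; simp at hx; omega), ih]
        simp [List.append_assoc]
      · simp only [hm, Bool.false_eq_true, if_false, List.nil_append]
        exact ih _ _
    · rw [aOuter_exit _ _ _ _ hdd]
      simp [pvEmitted, hdd]

theorem bOuter_emitted (b : Int) (fuel : Nat) : ∀ n d count : Int,
    bOuter b fuel n d count =
      (count + ((pvEmitted fuel n d).1.countP (fun x => PySem.Int.mod b x == 0) : Int),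
       (pvEmitted fuel n d).2) := by
  induction fuel with
  | zero => intro n d c; simp [bOuter, pvEmitted]
  | succ fuel ih =>
    intro n d c
    by_cases hdd : d * d ≤ n
    · by_cases hm : (PySem.Int.mod n d == 0) = true
      · simp only [bOuter, pvEmitted, hdd, if_true, hm]
        rw [ih]
        by_cases hb : (PySem.Int.mod b d == 0) = true <;>
          simp [hb, List.countP_cons] <;> push_cast <;> ring
      · have hsd : bStrip (n.toNat + 1) n d = n := by
          apply bStrip_id
          revert hm; cases (PySem.Int.mod n d == 0) <;> simp
        simp only [bOuter, pvEmitted, hdd, if_true, hm, Bool.false_eq_true, if_false]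
        rw [hsd, ih]
        simp
    · simp [bOuter, pvEmitted, hdd]

-- characterisation of the loop-exit value
theorem pv_exit_char (n d p : Int) (h1 : 1 ≤ n) (hd : 2 ≤ d)
    (hsmall : ∀ e : Int, 2 ≤ e → e < d → ¬ e ∣ n) (hdd : ¬ d * d ≤ n) :
    (p ∈ (if 1 < n then [n] else ([] : List Int))) ↔ (2 ≤ p ∧ Prime p ∧ p ∣ n) := by
  by_cases hn1 : 1 < n
  · simp only [hn1, if_true, List.mem_singleton]
    constructor
    · rintro rfl
      refine ⟨by omega, ?_, dvd_refl _⟩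
      apply pv_prime_of_minimal _ (by omega)
      intro e he2 hen hedvd
      by_cases hed : e < d
      · exact hsmall e he2 hed hedvd
      · push_neg at hed
        obtain ⟨k, hk⟩ := hedvd
        have hk1 : 1 ≤ k := by nlinarith
        have hk2 : 2 ≤ k := by
          by_contra hc
          have : k = 1 := by omega
          subst this; simp at hk; omega
        by_cases hkd : k < d
        · exact hsmall k hk2 hkd ⟨e, by rw [hk]; ring⟩
        · push_neg at hkd; nlinarith
    · rintro ⟨hp2, hp, hpd⟩
      have hpdlt : ¬ p < d := fun hlt => hsmall p hp2 hlt hpd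
      push_neg at hpdlt
      obtain ⟨k, hk⟩ := hpd
      have hk1 : 1 ≤ k := by nlinarith
      rcases eq_or_lt_of_le hk1 with h | h
      · rw [hk, ← h, mul_one]
      · exfalso
        have hk2 : 2 ≤ k := by omega
        by_cases hkd : k < d
        · exact hsmall k hk2 hkd ⟨p, by rw [hk]; ring⟩
        · push_neg at hkd; nlinarith
  · have hn : n = 1 := by omega
    subst hn
    simp only [if_neg hn1, List.not_mem_nil, false_iff]
    rintro ⟨hp2, _, hpd⟩
    have := Int.le_of_dvd one_pos hpd
    omega

-- full characterisation of A's trial-division list from any reachable state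
theorem pv_char (fuel : Nat) : ∀ n d : Int, 1 ≤ n → 2 ≤ d →
    (∀ e : Int, 2 ≤ e → e < d → ¬ e ∣ n) → n.toNat + 4 ≤ fuel + d.toNat →
    ∀ p : Int, p ∈ aOuter fuel n d [] ↔ (2 ≤ p ∧ Prime p ∧ p ∣ n) := by
  induction fuel with
  | zero =>
    intro n d h1 hd hsmall hfk p
    have hdn : n < d := by omega
    have hdd : ¬ d * d ≤ n := by nlinarith
    rw [aOuter_exit 0 n d [] hdd]
    simpa using pv_exit_char n d p h1 hd hsmall hdd
  | succ fuel ih =>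
    intro n d h1 hd hsmall hfk p
    by_cases hdd : d * d ≤ n
    · obtain ⟨hsdvd, hspos, hsnd, hsp⟩ := bStrip_spec (n.toNat + 1) n d h1 hd (by omega)
      rw [aOuter_succ_pos _ _ _ _ hdd, aInner_fresh _ _ _ [] rfl]
      set n' := bStrip (n.toNat + 1) n d with hn'
      have hsmall' : ∀ e : Int, 2 ≤ e → e < d + 1 → ¬ e ∣ n' := by
        intro e he2 hed hedvd
        by_cases hlt : e < d
        · exact hsmall e he2 hlt (hedvd.trans hsdvd)
        · have he : e = d := by omega
          subst he; exact hsnd hedvd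
      by_cases hm : (PySem.Int.mod n d == 0) = true
      · have hdvdn : d ∣ n := (pv_mod0 n d).mp hm
        have hdprime : Prime d :=
          pv_prime_of_minimal d hd (fun e he2 hed hedvd => hsmall e he2 hed (hedvd.trans hdvdn))
        have hn'lt : n' < n := by
          have hne : n' ≠ n := fun h => hsnd (h ▸ hdvdn)
          have hle : n' ≤ n := Int.le_of_dvd (by omega) hsdvd
          omega
        have hfk' : n'.toNat + 4 ≤ fuel + (d + 1).toNat := by omega
        simp only [hm, if_true, List.nil_append]
        rw [aOuter_prefix fuel n' (d + 1) [d] (by intro x hx; simp at hx; omega)]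
        constructor
        · intro hp
          rcases List.mem_append.mp hp with hp | hp
          · simp only [List.mem_singleton] at hp
            subst hp
            exact ⟨hd, hdprime, hdvdn⟩
          · obtain ⟨a2, ap, ad⟩ := (ih n' (d + 1) hspos (by omega) hsmall' hfk' p).mp hp
            exact ⟨a2, ap, ad.trans hsdvd⟩
        · rintro ⟨hp2, hp, hpd⟩
          by_cases hpe : p = d
          · subst hpe; simp
          · refine List.mem_append.mpr (Or.inr
              ((ih n' (d + 1) hspos (by omega) hsmall' hfk' p).mpr ⟨hp2, hp, ?_⟩))
            refine hsp p hp (fun hcon => hpe (pv_prime_dvd_prime p d hp2 hd hdprime hcon)) hpd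
      · have hmf : (PySem.Int.mod n d == 0) = false := by
          revert hm; cases (PySem.Int.mod n d == 0) <;> simp
        have hn'eq : n' = n := by rw [hn']; exact bStrip_id _ _ _ hmf
        simp only [hm, Bool.false_eq_true, if_false]
        rw [hn'eq] at hsmall' ⊢
        exact ih n (d + 1) h1 (by omega) hsmall' (by omega) p
    · rw [aOuter_exit _ _ _ _ hdd]
      simpa using pv_exit_char n d p h1 hd hsmall hdd

theorem aFactors_char (n : Int) (h : 2 ≤ n) (p : Int) :
    p ∈ aFactors n ↔ 2 ≤ p ∧ Prime p ∧ p ∣ n := by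
  unfold aFactors
  exact pv_char (n.toNat + 2) n 2 (by omega) (by omega)
    (fun e he hlt => absurd hlt (by omega)) (by simp) p

theorem aFactors_nil (n : Int) (h : n ≤ 1) : aFactors n = [] := by
  unfold aFactors
  rw [aOuter_exit _ _ _ _ (by omega)]
  simp [show ¬ (1:Int) < n from by omega]

theorem same_factor_key : ∀ (a b : Int), same_factor a b = same_factor_alt a b := by
  intro a b
  by_cases hb : b < 2
  · have hfb : aFactors b = [] := aFactors_nil b (by omega)
    simp [same_factor, same_factor_alt, hb, hfb]
  · push_neg at hb
    have hkey : ∀ x ∈ aFactors a,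
        ((aFactors b).contains x) = (PySem.Int.mod b x == 0) := by
      intro x hx
      have ha2 : 2 ≤ a := by
        by_contra hc
        push_neg at hc
        rw [aFactors_nil a (by omega)] at hx
        simp at hx
      obtain ⟨hx2, hxp, _⟩ := (aFactors_char a ha2 x).mp hx
      rw [Bool.eq_iff_iff, List.contains_iff_mem, aFactors_char b hb x, pv_mod0 b x]
      constructor
      · rintro ⟨_, _, hd⟩; exact hd
      · intro hd; exact ⟨hx2, hxp, hd⟩
    simp only [same_factor, same_factor_alt, if_neg (show ¬ b < 2 by omega)]
    rw [List.filter_congr hkey]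
    rw [bOuter_emitted b (a.toNat + 2) a 2 0]
    dsimp only
    unfold aFactors
    rw [aOuter_emitted (a.toNat + 2) a 2]
    set em := pvEmitted (a.toNat + 2) a 2 with hem
    rw [List.filter_append, List.length_append, ← List.countP_eq_length_filter]
    by_cases h1 : 1 < em.2
    · rw [if_pos h1]
      by_cases h2 : (PySem.Int.mod b em.2 == 0) = true
      · rw [if_pos (⟨h1, h2⟩ : _ ∧ _)]
        simp only [List.filter_cons, h2, if_true, List.filter_nil, List.length_cons,
          List.length_nil]
        rw [Bool.eq_iff_iff]
        simp only [beq_iff_eq]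
        omega
      · rw [if_neg (fun hc => h2 hc.2)]
        simp only [List.filter_cons, if_neg h2, List.filter_nil, List.length_nil]
        rw [Bool.eq_iff_iff]
        simp only [beq_iff_eq]
        omega
    · rw [if_neg h1, if_neg (fun hc => h1 hc.1)]
      simp only [List.filter_nil, List.length_nil]
      rw [Bool.eq_iff_iff]
      simp only [beq_iff_eq]
      omega

-- ===== VERDICT (by name: the statement is the Claim_ definition above) =====
theorem same_factor_spec : Claim_equal_same_factor := by
  intro a b _
  unfold Spec_same_factor
  exact same_factor_key a b
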